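-- pv_equiv track=rewrite | github.com/philippw23/Advent-of-Code-2025 | Day_12_Christmas_Tree_Farm/solve_part1.py | trim_shape
-- ===== SOURCE A (Python) =====
-- from typing import Dict, List, Sequence, Tuple
--
-- def trim_shape(rows: Sequence[str]) -> List[str]:
--     if not rows:
--         return []
--     width = max(len(row) for row in rows)
--     padded = [row.ljust(width, ".") for row in rows]
--
--     top = 0
--     while top < len(padded) and set(padded[top]) == {"."}:
--         top += 1
--     bottom = len(padded) - 1
--     while bottom >= 0 and set(padded[bottom]) == {"."}:
--         bottom -= 1
--
--     left = 0
--     while left < width and all(row[left] == "." for row in padded):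
--         left += 1
--     right = width - 1
--     while right >= 0 and all(row[right] == "." for row in padded):
--         right -= 1
--
--     return [row[left : right + 1] for row in padded[top : bottom + 1]]
-- ===== SOURCE B (Python) =====
-- def trim_shape(rows):
--     if not rows:
--         return []
--     width = max(len(row) for row in rows)
--     padded = [row.ljust(width, ".") for row in rows]
--     keep_rows = [i for i, row in enumerate(padded) if set(row) != {"."}]
--     keep_cols = [j for j in range(width) if any(row[j] != "." for row in padded)]
--     top = keep_rows[0] if keep_rows else len(padded)
--     bottom = keep_rows[-1] if keep_rows else -1
--     left = keep_cols[0] if keep_cols else width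
--     right = keep_cols[-1] if keep_cols else -1
--     return [row[left:right + 1] for row in padded[top:bottom + 1]]
-- ===== Notes on version B (the rewrite author's own statement) =====
-- stated objective: alternative
-- what changed: Replaces A's four sentinel while-loops (advancing top/bottom/left/right one step at a time) by building the index lists of non-blank rows and columns in single passes and reading the bounding box off their first and last entries.
import Mathlib
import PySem

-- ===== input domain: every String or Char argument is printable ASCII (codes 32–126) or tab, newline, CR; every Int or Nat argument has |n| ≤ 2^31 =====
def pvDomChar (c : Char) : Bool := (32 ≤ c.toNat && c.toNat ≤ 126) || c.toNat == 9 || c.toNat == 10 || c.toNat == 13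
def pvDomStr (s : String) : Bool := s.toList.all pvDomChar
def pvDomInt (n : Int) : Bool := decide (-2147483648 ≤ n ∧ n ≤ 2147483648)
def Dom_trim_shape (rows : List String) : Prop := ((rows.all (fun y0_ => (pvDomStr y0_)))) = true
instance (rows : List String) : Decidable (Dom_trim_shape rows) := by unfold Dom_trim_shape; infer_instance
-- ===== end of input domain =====

-- B replaces A's four sentinel while-loops by one-pass index lists of the non-blank
-- rows/columns and reads the bounding box off their first/last entries (objective: alternative).

-- ===== PORT A =====

-- set(row) == {"."} ⟺ the row is nonempty and every char is '.' (exact for strings).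
def pvRowAllDotA (r : List Char) : Bool := !r.isEmpty && r.all (fun c => c == '.')

-- all(row[j] == "." for row in padded); every padded row has length width and j < width
-- whenever this is called, so getD with default '.' is exact.
def pvColAllDotA (padded : List (List Char)) (j : Nat) : Bool :=
  padded.all (fun r => r.getD j '.' == '.')

-- a 'while' scanning a sequence front-to-back and counting how far the condition holds
def pvCountLeading {α : Type} (p : α → Bool) : List α → Nat
  | [] => 0
  | a :: l => if p a then pvCountLeading p l + 1 else 0

-- width = max(len(row) for row in rows)
def pvWidthA (rows : List String) : Nat := (rows.map (fun r => r.toList.length)).foldl max 0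

-- padded = [row.ljust(width, ".") for row in rows]
def pvPaddedA (rows : List String) : List (List Char) :=
  rows.map (fun r => r.toList ++ List.replicate (pvWidthA rows - r.toList.length) '.')

def trim_shape (rows : List String) : List String :=
  if rows.isEmpty then [] else
  let width : Nat := pvWidthA rows
  let padded : List (List Char) := pvPaddedA rows
  -- 'while top < len(padded) and set(padded[top]) == {"."}: top += 1'
  let top : Nat := pvCountLeading pvRowAllDotA padded
  -- the bottom loop walks from the end, i.e. counts trailing all-dot rows
  let bottom : Int := (padded.length : Int) - 1 - (pvCountLeading pvRowAllDotA padded.reverse : Int)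
  -- 'while left < width and all(row[left] == "." ...)': scan of the column indices 0..width-1
  let left : Nat := pvCountLeading (pvColAllDotA padded) (List.range width)
  -- the right loop walks the column indices from the end
  let right : Int := (width : Int) - 1 - (pvCountLeading (pvColAllDotA padded) (List.range width).reverse : Int)
  (PySem.List.slice padded (some (top : Int)) (some (bottom + 1))).map
    (fun r => String.ofList (PySem.List.slice r (some (left : Int)) (some (right + 1))))

-- ===== PORT B =====

-- set(row) != {"."} ⟺ the row is empty or some char differs from '.' (exact for strings).
def pvRowKeepB (r : List Char) : Bool := r.isEmpty || r.any (fun c => c != '.')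

-- any(row[j] != "." for row in padded); j < width = length of every padded row, so getD is exact.
def pvColInkB (padded : List (List Char)) (j : Nat) : Bool :=
  padded.any (fun r => r.getD j '.' != '.')

-- width = max(len(row) for row in rows)
def pvWidthB (rows : List String) : Nat := (rows.map (fun r => r.toList.length)).foldl max 0

-- padded = [row.ljust(width, ".") for row in rows]
def pvPaddedB (rows : List String) : List (List Char) :=
  rows.map (fun r => r.toList ++ List.replicate (pvWidthB rows - r.toList.length) '.')

def trim_shape_alt (rows : List String) : List String :=
  if rows.isEmpty then [] else
  let width : Nat := pvWidthB rows
  let padded : List (List Char) := pvPaddedB rows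
  let keepRows : List Int :=
    ((PySem.List.enumerate padded 0).filter (fun z => pvRowKeepB z.2)).map (fun z => z.1)
  let keepCols : List Nat := (List.range width).filter (fun j => pvColInkB padded j)
  let top : Int := keepRows.head?.getD (padded.length : Int)
  let bottom : Int := keepRows.getLast?.getD (-1)
  let left : Int := (keepCols.head?.map (fun j => (j : Int))).getD (width : Int)
  let right : Int := (keepCols.getLast?.map (fun j => (j : Int))).getD (-1)
  (PySem.List.slice padded (some top) (some (bottom + 1))).map
    (fun r => String.ofList (PySem.List.slice r (some left) (some (right + 1))))

-- ===== PRECONDITION & SPEC =====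
def Spec_trim_shape (rows : List String) (out : List String) : Prop := out = trim_shape_alt rows
instance (rows : List String) (out : List String) : Decidable (Spec_trim_shape rows out) := by unfold Spec_trim_shape; infer_instance

-- ===== CLAIM (what is proved, stated in full; the proofs are below) =====
def Claim_equal_trim_shape : Prop := ∀ (rows : List String), Dom_trim_shape rows → Spec_trim_shape rows (trim_shape rows)

-- ===== LEMMAS AND PROOFS =====

theorem pvCountLeading_le {α : Type} (p : α → Bool) (l : List α) :
    pvCountLeading p l ≤ l.length := by
  induction l with
  | nil => simp [pvCountLeading]
  | cons a l ih => simp only [pvCountLeading, List.length_cons]; split <;> omega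

theorem pvRowKeepB_eq (r : List Char) : pvRowKeepB r = !pvRowAllDotA r := by
  simp [pvRowKeepB, pvRowAllDotA, List.any_eq_not_all_not, bne]

theorem pvColInkB_eq (padded : List (List Char)) (j : Nat) :
    pvColInkB padded j = !pvColAllDotA padded j := by
  simp [pvColInkB, pvColAllDotA, List.any_eq_not_all_not, bne]

-- the first element surviving a filter sits right after the leading block failing the kept test
theorem head?_filter_not {α : Type} (f q : α → Bool) (l : List α) (h : ∀ a, f a = !q a) :
    (l.filter f).head? = l[pvCountLeading q l]? := by
  induction l with
  | nil => simp
  | cons a l ih =>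
    by_cases hq : q a = true
    · have : f a = false := by rw [h, hq]; rfl
      simpa [pvCountLeading, this, hq] using ih
    · have : f a = true := by rw [h]; simp [hq]
      simp [List.filter_cons, this, pvCountLeading, hq]

theorem countLeading_map {α β : Type} (p : β → Bool) (f : α → β) (l : List α) :
    pvCountLeading (fun a => p (f a)) l = pvCountLeading p (l.map f) := by
  induction l with
  | nil => rfl
  | cons a l ih => simp only [List.map_cons, pvCountLeading, ih]

theorem topEq (p : List Char → Bool) (l : List (List Char)) :
    ((((PySem.List.enumerate l 0).filter (fun z => !p z.2)).map (fun z => z.1)).head?.getD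
      (l.length : Int)) = (pvCountLeading p l : Int) := by
  have hc : pvCountLeading (fun z : Int × List Char => p z.2) (PySem.List.enumerate l 0)
      = pvCountLeading p l := by
    rw [countLeading_map p (Prod.snd : Int × List Char → List Char), PySem.List.map_snd_enumerate]
  rw [List.head?_map,
    head?_filter_not (fun z => !p z.2) (fun z : Int × List Char => p z.2) _ (fun a => rfl),
    hc, PySem.List.getElem?_enumerate]
  have hle := pvCountLeading_le p l
  by_cases h : pvCountLeading p l < l.length
  · simp [List.getElem?_eq_getElem h]
  · have hnone : l[pvCountLeading p l]? = none := by
      rw [List.getElem?_eq_none_iff]; omega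
    simp [hnone]; omega

theorem bottomEq (p : List Char → Bool) (l : List (List Char)) :
    ((((PySem.List.enumerate l 0).filter (fun z => !p z.2)).map (fun z => z.1)).getLast?.getD
      (-1 : Int)) = (l.length : Int) - 1 - (pvCountLeading p l.reverse : Int) := by
  have hc : pvCountLeading (fun z : Int × List Char => p z.2) (PySem.List.enumerate l 0).reverse
      = pvCountLeading p l.reverse := by
    rw [countLeading_map p (Prod.snd : Int × List Char → List Char), List.map_reverse,
      PySem.List.map_snd_enumerate]
  rw [List.getLast?_map, ← List.head?_reverse, ← List.filter_reverse,
    head?_filter_not (fun z => !p z.2) (fun z : Int × List Char => p z.2) _ (fun a => rfl),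
    hc]
  have hle := pvCountLeading_le p l.reverse
  rw [List.length_reverse] at hle
  by_cases h : pvCountLeading p l.reverse < l.length
  · have hrev : (PySem.List.enumerate l 0).reverse[pvCountLeading p l.reverse]?
        = (PySem.List.enumerate l 0)[l.length - 1 - pvCountLeading p l.reverse]? := by
      rw [List.getElem?_reverse (by simpa [PySem.List.length_enumerate] using h)]
      simp [PySem.List.length_enumerate]
    rw [hrev, PySem.List.getElem?_enumerate]
    have hsome : l[l.length - 1 - pvCountLeading p l.reverse]? =
        some l[l.length - 1 - pvCountLeading p l.reverse] :=
      List.getElem?_eq_getElem (by omega)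
    simp [hsome]; omega
  · have hnone : (PySem.List.enumerate l 0).reverse[pvCountLeading p l.reverse]? = none := by
      rw [List.getElem?_eq_none_iff]; simp [PySem.List.length_enumerate]; omega
    simp [hnone]; omega

theorem leftEq (q : Nat → Bool) (n : Nat) :
    ((((List.range n).filter (fun j => !q j)).head?.map (fun j => (j : Int))).getD (n : Int))
      = (pvCountLeading q (List.range n) : Int) := by
  rw [head?_filter_not (fun j => !q j) q _ (fun a => rfl)]
  have hle := pvCountLeading_le q (List.range n)
  rw [List.length_range] at hle
  by_cases h : pvCountLeading q (List.range n) < n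
  · simp [List.getElem?_range h]
  · have hnone : (List.range n)[pvCountLeading q (List.range n)]? = none := by
      rw [List.getElem?_eq_none_iff]; simp only [List.length_range]; omega
    simp [hnone]; omega

theorem rightEq (q : Nat → Bool) (n : Nat) :
    ((((List.range n).filter (fun j => !q j)).getLast?.map (fun j => (j : Int))).getD (-1 : Int))
      = (n : Int) - 1 - (pvCountLeading q (List.range n).reverse : Int) := by
  rw [← List.head?_reverse, ← List.filter_reverse,
    head?_filter_not (fun j => !q j) q _ (fun a => rfl)]
  have hle := pvCountLeading_le q (List.range n).reverse
  rw [List.length_reverse, List.length_range] at hle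
  by_cases h : pvCountLeading q (List.range n).reverse < n
  · have hrev : (List.range n).reverse[pvCountLeading q (List.range n).reverse]?
        = (List.range n)[n - 1 - pvCountLeading q (List.range n).reverse]? := by
      rw [List.getElem?_reverse (by simpa using h)]
      simp
    rw [hrev, List.getElem?_range (by omega)]
    simp; omega
  · have hnone : (List.range n).reverse[pvCountLeading q (List.range n).reverse]? = none := by
      rw [List.getElem?_eq_none_iff]; simp only [List.length_reverse, List.length_range]; omega
    simp [hnone]; omega

-- both ports compute the same crop once the four indices are shown equal
theorem coreEq (padded : List (List Char)) (width : Nat) :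
    ((PySem.List.slice padded (some ((((PySem.List.enumerate padded 0).filter
        (fun z => pvRowKeepB z.2)).map (fun z => z.1)).head?.getD (padded.length : Int)))
      (some ((((PySem.List.enumerate padded 0).filter (fun z => pvRowKeepB z.2)).map
        (fun z => z.1)).getLast?.getD (-1) + 1))).map
      (fun r => String.ofList (PySem.List.slice r
        (some ((((List.range width).filter (fun j => pvColInkB padded j)).head?.map
          (fun j => (j : Int))).getD (width : Int)))
        (some ((((List.range width).filter (fun j => pvColInkB padded j)).getLast?.map
          (fun j => (j : Int))).getD (-1) + 1)))))
    = (PySem.List.slice padded (some ((pvCountLeading pvRowAllDotA padded : Nat) : Int))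
        (some ((padded.length : Int) - 1 - (pvCountLeading pvRowAllDotA padded.reverse : Int) + 1))).map
      (fun r => String.ofList (PySem.List.slice r
        (some ((pvCountLeading (pvColAllDotA padded) (List.range width) : Nat) : Int))
        (some ((width : Int) - 1 -
          (pvCountLeading (pvColAllDotA padded) (List.range width).reverse : Int) + 1)))) := by
  simp only [pvRowKeepB_eq, pvColInkB_eq]
  rw [topEq pvRowAllDotA padded, bottomEq pvRowAllDotA padded,
    leftEq (pvColAllDotA padded) width, rightEq (pvColAllDotA padded) width]

-- ===== VERDICT (by name: the statement is the Claim_ definition above) =====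
theorem trim_shape_spec : Claim_equal_trim_shape := by
  intro rows _
  unfold Spec_trim_shape trim_shape trim_shape_alt
  by_cases h : rows.isEmpty
  · simp [h]
  · have ep : pvPaddedB rows = pvPaddedA rows := rfl
    have ew : pvWidthB rows = pvWidthA rows := rfl
    simp only [h, ep, ew]
    exact (coreEq (pvPaddedA rows) (pvWidthA rows)).symm
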